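-- pv_equiv track=rewrite | github.com/robertmetzker/robertmetzker | bwcrun/run_policy_hist_vsql_snow.py | get_batch
-- ===== SOURCE A (Python) =====
-- def get_batch( rows, col ):
--     '''
--     IMPORTED from vertica legacy inf_vsql
--     row generator: pec_pes_rows,column:'CLM_AGRE_ID'
--     batch only has 1 element in it at most
--     example batch = AGRE_ID:[ row, row, row ]
--     '''
--
--     batch = {}
--     for row in rows:
--         if not isinstance(row, dict):
--             raise ValueError('# ERR: row must be a dict')
--         col_value = row[col]
--         if col_value not in batch:
--             if batch:
--                 #got new key, yield rows from old key
--                 old_rows = batch.popitem()[1]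
--                 yield old_rows
--                 #batch is now empty
--             batch[col_value] = []
--         #always runs
--         batch[col_value].append(row)
--     if batch:
--         yield batch.popitem()[1]
-- ===== SOURCE B (Python) =====
-- def get_batch(rows, col):
--     # Group consecutive rows by rows[col] as a list of (key, group) runs,
--     # comparing each row's key with the last run's key; no accumulator dict.
--     runs = []
--     for row in rows:
--         if not isinstance(row, dict):
--             raise ValueError('# ERR: row must be a dict')
--         key = row[col]
--         if runs and runs[-1][0] == key:
--             runs[-1][1].append(row)
--         else:
--             runs.append((key, [row]))
--     for _, group in runs:
--         yield group
-- ===== Notes on version B (the rewrite author's own statement) =====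
-- stated objective: simpler
-- what changed: B replaces the single-entry accumulator dict with its popitem/membership dance by a plain list of (key, group) runs extended by comparing each row's key to the last run's key with ==; groups are yielded after the scan.
import Mathlib
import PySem

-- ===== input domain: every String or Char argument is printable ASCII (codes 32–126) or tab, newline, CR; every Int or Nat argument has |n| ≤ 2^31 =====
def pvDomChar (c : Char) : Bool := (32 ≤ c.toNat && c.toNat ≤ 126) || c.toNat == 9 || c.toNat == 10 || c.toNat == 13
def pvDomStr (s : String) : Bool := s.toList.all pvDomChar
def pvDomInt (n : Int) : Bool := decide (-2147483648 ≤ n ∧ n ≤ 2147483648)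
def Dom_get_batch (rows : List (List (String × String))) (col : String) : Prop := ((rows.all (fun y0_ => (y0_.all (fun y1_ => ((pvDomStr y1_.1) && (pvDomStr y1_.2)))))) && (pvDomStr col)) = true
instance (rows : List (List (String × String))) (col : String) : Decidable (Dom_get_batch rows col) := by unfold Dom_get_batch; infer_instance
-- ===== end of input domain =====

-- B replaces A's single-entry accumulator dict (membership test + popitem) by a list of
-- (key, group) runs extended by comparing each row's key with the last run's key; equivalence
-- is about the fully-consumed generator's return value (both yield the same groups in order).

-- ===== PORT A =====
-- loop body of A: state is (groups yielded so far, batch dict). popitem() is ported by hand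
-- (last item of the insertion-ordered items list, exact since Python's popitem pops the last item).
def get_batch_stepA (col : String)
    (st : List (List (List (String × String))) × PySem.Dict String (List (List (String × String))))
    (row : List (String × String)) :
    List (List (List (String × String))) × PySem.Dict String (List (List (String × String))) :=
  let (out, batch) := st
  match (PySem.Dict.ofList row).get? col with
  | none => (out, batch)  -- KeyError in Python: excluded by Pre_
  | some v =>
    let (out, batch) :=
      if batch.contains v then (out, batch)
      else
        let (out, batch) :=
          if batch.items.isEmpty then (out, batch)
          else (out ++ [(batch.items.getLastD ("", [])).2],   -- old_rows = batch.popitem()[1]; yield old_rows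
                PySem.Dict.mk batch.items.dropLast)
        (out, batch.insert v [])                              -- batch[col_value] = []
    (out, batch.modify v [] (· ++ [row]))                     -- batch[col_value].append(row)

def get_batch (rows : List (List (String × String))) (col : String) : List (List (List (String × String))) :=
  let (out, batch) := rows.foldl (get_batch_stepA col) ([], PySem.Dict.empty)
  if batch.items.isEmpty then out else out ++ [(batch.items.getLastD ("", [])).2]

-- ===== PORT B =====
-- loop body of B: state is the list of (key, group) runs.
def get_batch_stepB (col : String)
    (runs : List (String × List (List (String × String))))
    (row : List (String × String)) :
    List (String × List (List (String × String))) :=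
  match (PySem.Dict.ofList row).get? col with
  | none => runs  -- KeyError in Python: excluded by Pre_
  | some k =>
    match runs.getLast? with
    | some (k', g) => if k' == k then runs.dropLast ++ [(k', g ++ [row])] else runs ++ [(k, [row])]
    | none => runs ++ [(k, [row])]

def get_batch_alt (rows : List (List (String × String))) (col : String) : List (List (List (String × String))) :=
  (rows.foldl (get_batch_stepB col) []).map (·.2)

-- ===== PRECONDITION & SPEC =====
-- Pre_ excludes exactly the inputs where some row lacks the key col, on which Python A raises KeyError.
def Pre_get_batch (rows : List (List (String × String))) (col : String) : Prop :=
  rows.all (fun r => ((PySem.Dict.ofList r).get? col).isSome) = true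
instance (rows : List (List (String × String))) (col : String) : Decidable (Pre_get_batch rows col) := by unfold Pre_get_batch; infer_instance

def pvWitness_get_batch : (List (List (String × String))) × String :=
  ([[("k", "1")], [("k", "1"), ("j", "z")], [("k", "2")]], "k")

def Spec_get_batch (rows : List (List (String × String))) (col : String) (out : List (List (List (String × String)))) : Prop := out = get_batch_alt rows col
instance (rows : List (List (String × String))) (col : String) (out : List (List (List (String × String)))) : Decidable (Spec_get_batch rows col out) := by unfold Spec_get_batch; infer_instance

-- ===== CLAIM (what is proved, stated in full; the proofs are below) =====
def Claim_equal_get_batch : Prop := ∀ (rows : List (List (String × String))) (col : String), Dom_get_batch rows col → Pre_get_batch rows col → Spec_get_batch rows col (get_batch rows col)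

-- ===== LEMMAS AND PROOFS =====

-- A's loop state reconstructed from B's runs: the batch dict holds exactly the last run,
-- and the yielded groups are the values of the earlier runs.
def pvBatchOf (runs : List (String × List (List (String × String)))) :
    PySem.Dict String (List (List (String × String))) :=
  PySem.Dict.mk (match runs.getLast? with | none => [] | some p => [p])

def pvOutOf (runs : List (String × List (List (String × String)))) :
    List (List (List (String × String))) :=
  runs.dropLast.map (·.2)

lemma pv_step_eq (col : String) (runs : List (String × List (List (String × String))))
    (row : List (String × String)) :
    get_batch_stepA col (pvOutOf runs, pvBatchOf runs) row
      = (pvOutOf (get_batch_stepB col runs row), pvBatchOf (get_batch_stepB col runs row)) := by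
  unfold get_batch_stepA get_batch_stepB
  cases hk : (PySem.Dict.ofList row).get? col with
  | none => rfl
  | some k =>
    rcases List.eq_nil_or_concat runs with hr | ⟨rs, ⟨k', g⟩, hr⟩
    · subst hr
      simp [pvBatchOf, pvOutOf, PySem.Dict.contains, PySem.Dict.insert,
        PySem.Dict.modify, PySem.Dict.getD, PySem.Dict.get?]
    · subst hr
      by_cases hkk : k' = k
      · subst hkk
        simp [pvBatchOf, pvOutOf, PySem.Dict.contains, PySem.Dict.insert,
          PySem.Dict.modify, PySem.Dict.getD, PySem.Dict.get?]
      · have hbe : (k' == k) = false := by simp [hkk]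
        simp [pvBatchOf, pvOutOf, PySem.Dict.contains, PySem.Dict.insert,
          PySem.Dict.modify, PySem.Dict.getD, PySem.Dict.get?, hbe]

lemma pv_fold_eq (col : String) (rows : List (List (String × String)))
    (runs : List (String × List (List (String × String)))) :
    rows.foldl (get_batch_stepA col) (pvOutOf runs, pvBatchOf runs)
      = (pvOutOf (rows.foldl (get_batch_stepB col) runs),
         pvBatchOf (rows.foldl (get_batch_stepB col) runs)) := by
  induction rows generalizing runs with
  | nil => rfl
  | cons r rest ih =>
    simp only [List.foldl_cons, pv_step_eq]
    exact ih _

lemma pv_final_eq (runs : List (String × List (List (String × String)))) :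
    (if (pvBatchOf runs).items.isEmpty then pvOutOf runs
     else pvOutOf runs ++ [((pvBatchOf runs).items.getLastD ("", [])).2])
      = runs.map (·.2) := by
  rcases List.eq_nil_or_concat runs with hr | ⟨rs, ⟨k', g⟩, hr⟩ <;> subst hr <;>
    simp [pvBatchOf, pvOutOf]

-- ===== VERDICT (by name: the statement is the Claim_ definition above) =====
theorem get_batch_spec : Claim_equal_get_batch := by
  intro rows col _ _
  show get_batch rows col = get_batch_alt rows col
  unfold get_batch get_batch_alt
  have h0 : (([], PySem.Dict.empty) :
      List (List (List (String × String))) × PySem.Dict String (List (List (String × String))))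
      = (pvOutOf [], pvBatchOf []) := rfl
  rw [h0, pv_fold_eq]
  exact pv_final_eq _
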